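-- pv_equiv track=rewrite | github.com/Pranima23/COMP314-Miniproject | textrank/keywords.py | _combine_adjacent_keywords
-- ===== SOURCE A (Python) =====
-- def _combine_adjacent_keywords(ranks, text, total):
--     """ Combine adjancent keywords in a sentence """
--     keywords = []
--     words = []
--     kranks = ranks.keys()
--     ranks = dict(ranks)
--     sents = [[word.strip().lower() for word in sent.split(" ")] for sent in text.split(".")]
--     for sent in sents:
--         word = []
--         l = len(sent)
--         for i in range(l):
--             if sent[i] in kranks and sent[i] not in words:
--                 word.append(sent[i])
--                 words.append(sent[i])
--                 if not i + 1 == l: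
--                     for j in range(i+1, l):
--                         if sent[j] in kranks:
--                             word.append(sent[j])
--                             words.append(sent[j])
--                         else:
--                             break
--                 pw = sum([ranks[w] for w in word])
--                 keywords.append((" ".join(word), pw))
--                 word = []
--     keywords = sorted(keywords, key=lambda x: x[1], reverse=True)
--     return keywords[:total]
-- ===== SOURCE B (Python) =====
-- def _combine_adjacent_keywords(ranks, text, total):
--     """Combine adjacent keywords in a sentence (run-grouping rewrite)."""
--     keywords = []
--     seen = set()
--     for sent in text.split("."):
--         tokens = [w.strip().lower() for w in sent.split(" ")]
--         # split the sentence into maximal runs of consecutive keyword tokens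
--         runs = []
--         cur = []
--         for tok in tokens:
--             if tok in ranks:
--                 cur.append(tok)
--             elif cur:
--                 runs.append(cur)
--                 cur = []
--         if cur:
--             runs.append(cur)
--         # one phrase per run: drop leading already-seen tokens, keep the rest
--         for run in runs:
--             k = 0
--             while k < len(run) and run[k] in seen:
--                 k += 1
--             if k < len(run):
--                 phrase = run[k:]
--                 seen.update(phrase)
--                 keywords.append((" ".join(phrase), sum(ranks[w] for w in phrase)))
--     keywords.sort(key=lambda x: x[1], reverse=True)
--     return keywords[:total]
-- ===== Notes on version B (the rewrite author's own statement) =====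
-- stated objective: alternative
-- what changed: B splits each sentence into maximal runs of consecutive keyword tokens in one grouping pass and flushes at most one phrase per run (dropping the already-seen leading tokens) with a seen-set, instead of A's per-index scan with a nested extension loop and a linear membership scan over a growing list.
import Mathlib
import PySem

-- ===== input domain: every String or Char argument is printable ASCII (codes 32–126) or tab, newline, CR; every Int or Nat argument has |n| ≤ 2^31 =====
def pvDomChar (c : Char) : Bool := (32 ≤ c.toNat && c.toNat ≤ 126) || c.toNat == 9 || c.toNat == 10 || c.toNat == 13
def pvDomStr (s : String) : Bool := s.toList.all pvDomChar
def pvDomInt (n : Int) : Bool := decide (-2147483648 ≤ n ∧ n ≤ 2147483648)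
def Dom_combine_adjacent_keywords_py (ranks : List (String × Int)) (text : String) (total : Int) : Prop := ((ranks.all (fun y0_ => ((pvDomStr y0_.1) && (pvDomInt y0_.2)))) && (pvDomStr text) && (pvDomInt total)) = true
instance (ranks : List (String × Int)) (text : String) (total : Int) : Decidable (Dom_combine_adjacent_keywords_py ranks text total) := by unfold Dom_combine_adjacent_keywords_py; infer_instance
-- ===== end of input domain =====

-- B regroups each sentence into maximal keyword runs and flushes one phrase per run
-- (same return value as A's nested index scan); objective: alternative decomposition.

-- ===== PORT A =====
-- shared normalisation: word.strip().lower()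
def pvNorm (w : String) : String := PySem.Str.lower (PySem.Str.strip w)

-- shared tokenisation: [[word.strip().lower() for word in sent.split(" ")] for sent in text.split(".")]
-- (split? is exact here: the separators "." and " " are nonempty literals, so it never returns none)
def pvSents (text : String) : List (List String) :=
  ((PySem.Str.split? text ".").getD []).map
    (fun sent => ((PySem.Str.split? sent " ").getD []).map pvNorm)

-- inner j-loop of A: extend the phrase while the next token is a keyword, else break
def pvAInner (d : PySem.Dict String Int) (rest : List String) (word words : List String) :
    List String × List String :=
  match rest with
  | [] => (word, words)
  | w :: rs =>
    if d.contains w then pvAInner d rs (word ++ [w]) (words ++ [w])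
    else (word, words)

-- outer i-loop of A over one sentence, threading (keywords, words)
def pvASent (d : PySem.Dict String Int) (sent : List String)
    (kw : List (String × Int)) (words : List String) : List (String × Int) × List String :=
  match sent with
  | [] => (kw, words)
  | w :: rest =>
    if d.contains w ∧ w ∉ words then
      let p := pvAInner d rest [w] (words ++ [w])
      let pw := (p.1.map (fun x => d.getD x 0)).sum
      pvASent d rest (kw ++ [(PySem.Str.join " " p.1, pw)]) p.2
    else pvASent d rest kw words

def combine_adjacent_keywords_py (ranks : List (String × Int)) (text : String) (total : Int) :
    List (String × Int) :=
  let d := PySem.Dict.ofList ranks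
  let st := (pvSents text).foldl (fun st sent => pvASent d sent st.1 st.2)
              (([] : List (String × Int)), ([] : List String))
  PySem.List.slice (PySem.List.sorted st.1 (fun x => x.2) true) none (some total)

-- ===== PORT B =====
-- split a token list into its maximal runs of consecutive keyword tokens
def pvRuns (d : PySem.Dict String Int) (tokens : List String) (cur : List String) :
    List (List String) :=
  match tokens with
  | [] => if cur = [] then [] else [cur]
  | t :: ts =>
    if d.contains t then pvRuns d ts (cur ++ [t])
    else if cur = [] then pvRuns d ts []
    else cur :: pvRuns d ts []

-- B's while-loop: drop the leading already-seen tokens of a run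
def pvDropSeen (seen : PySem.Set String) (run : List String) : List String :=
  match run with
  | [] => []
  | w :: rs => if w ∈ seen then pvDropSeen seen rs else w :: rs

-- flush one run: if anything is left after the seen prefix, emit it as a phrase
def pvBFlush (d : PySem.Dict String Int) (st : List (String × Int) × PySem.Set String)
    (run : List String) : List (String × Int) × PySem.Set String :=
  let phrase := pvDropSeen st.2 run
  if phrase = [] then st
  else (st.1 ++ [(PySem.Str.join " " phrase, (phrase.map (fun x => d.getD x 0)).sum)],
        PySem.Set.update st.2 phrase)

def combine_adjacent_keywords_py_alt (ranks : List (String × Int)) (text : String) (total : Int) :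
    List (String × Int) :=
  let d := PySem.Dict.ofList ranks
  let st := (pvSents text).foldl
              (fun st tokens => (pvRuns d tokens []).foldl (pvBFlush d) st)
              (([] : List (String × Int)), PySem.Set.empty)
  PySem.List.slice (PySem.List.sorted st.1 (fun x => x.2) true) none (some total)

-- ===== PRECONDITION & SPEC =====
def Spec_combine_adjacent_keywords_py (ranks : List (String × Int)) (text : String) (total : Int) (out : List (String × Int)) : Prop := out = combine_adjacent_keywords_py_alt ranks text total
instance (ranks : List (String × Int)) (text : String) (total : Int) (out : List (String × Int)) : Decidable (Spec_combine_adjacent_keywords_py ranks text total out) := by unfold Spec_combine_adjacent_keywords_py; infer_instance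

-- ===== CLAIM (what is proved, stated in full; the proofs are below) =====
def Claim_equal_combine_adjacent_keywords_py : Prop := ∀ (ranks : List (String × Int)) (text : String) (total : Int), Dom_combine_adjacent_keywords_py ranks text total → Spec_combine_adjacent_keywords_py ranks text total (combine_adjacent_keywords_py ranks text total)

-- ===== LEMMAS AND PROOFS =====

-- A's inner loop appends exactly the keyword-prefix of the remaining tokens
theorem pvAInner_eq (d : PySem.Dict String Int) (rest : List String) (word words : List String) :
    pvAInner d rest word words =
      (word ++ rest.takeWhile (fun t => d.contains t),
       words ++ rest.takeWhile (fun t => d.contains t)) := by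
  induction rest generalizing word words with
  | nil => simp [pvAInner]
  | cons w rs ih =>
    by_cases h : d.contains w
    · simp [pvAInner, h, ih, List.takeWhile_cons]
    · simp [pvAInner, h, List.takeWhile_cons]

-- pvRuns with a nonempty accumulator: first run = accumulator ++ keyword prefix
theorem pvRuns_acc (d : PySem.Dict String Int) (ts : List String) (cur : List String)
    (hc : cur ≠ []) :
    pvRuns d ts cur =
      (cur ++ ts.takeWhile (fun t => d.contains t)) ::
        pvRuns d (ts.dropWhile (fun t => d.contains t)) [] := by
  induction ts generalizing cur with
  | nil => simp [pvRuns, hc]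
  | cons t ts ih =>
    by_cases h : d.contains t
    · rw [pvRuns]
      simp only [h, if_pos]
      rw [ih (cur ++ [t]) (by simp)]
      simp [List.takeWhile_cons, List.dropWhile_cons, h]
    · rw [pvRuns]
      simp [List.takeWhile_cons, List.dropWhile_cons, h, hc, pvRuns]

-- A's outer loop skips a block of tokens that are all already recorded
theorem pvASent_skip (d : PySem.Dict String Int) (t u : List String)
    (kw : List (String × Int)) (words : List String) (h : ∀ x ∈ t, x ∈ words) :
    pvASent d (t ++ u) kw words = pvASent d u kw words := by
  induction t with
  | nil => rfl
  | cons x xs ih =>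
    have hx : x ∈ words := h x (by simp)
    rw [List.cons_append, pvASent]
    simp only [hx, not_true_eq_false, and_false, if_false]
    exact ih (fun y hy => h y (by simp [hy]))

theorem pvDropSeen_head_unseen (seen : PySem.Set String) (w : String) (rs : List String)
    (h : w ∉ seen) : pvDropSeen seen (w :: rs) = w :: rs := by
  simp [pvDropSeen, h]

-- MAIN per-sentence lemma: A's index scan and B's run grouping produce the same
-- keyword list, and record membership-equivalent "seen" states.
theorem pvSent_eq (d : PySem.Dict String Int) :
    ∀ (n : Nat) (sent : List String), sent.length ≤ n →
    ∀ (kw : List (String × Int)) (words : List String) (seen : PySem.Set String),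
      (∀ x, x ∈ words ↔ x ∈ seen) →
      (pvASent d sent kw words).1 = ((pvRuns d sent []).foldl (pvBFlush d) (kw, seen)).1 ∧
      (∀ x, x ∈ (pvASent d sent kw words).2 ↔
            x ∈ ((pvRuns d sent []).foldl (pvBFlush d) (kw, seen)).2) := by
  intro n
  induction n with
  | zero =>
    intro sent hlen kw words seen hrel
    have : sent = [] := List.eq_nil_of_length_eq_zero (Nat.le_zero.mp hlen)
    subst this
    exact ⟨rfl, hrel⟩
  | succ n ih =>
    intro sent hlen kw words seen hrel
    match sent with
    | [] => exact ⟨rfl, hrel⟩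
    | w :: rest =>
      have hlen' : rest.length ≤ n := by simpa using hlen
      by_cases hk : d.contains w
      · set r := rest.takeWhile (fun t => d.contains t) with hr
        set u := rest.dropWhile (fun t => d.contains t) with hu
        have hrest : rest = r ++ u := (List.takeWhile_append_dropWhile).symm
        have hulen : u.length ≤ n := by
          have h1 := List.length_dropWhile_le (fun t => d.contains t) rest
          rw [hu]; omega
        have hruns : pvRuns d (w :: rest) [] = (w :: r) :: pvRuns d u [] := by
          rw [pvRuns]; simp only [hk, if_pos, List.nil_append]
          rw [pvRuns_acc d rest [w] (by simp)]; rfl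
        have hrall : ∀ x ∈ r, d.contains x := by
          intro x hx; exact List.mem_takeWhile_imp (hr ▸ hx)
        by_cases hw : w ∈ words
        · -- seen head: A skips it; B's flush drops it
          have hwseen : w ∈ seen := (hrel w).mp hw
          have hA : pvASent d (w :: rest) kw words = pvASent d rest kw words := by
            rw [pvASent]; simp [hw]
          have hdrop : pvDropSeen seen (w :: r) = pvDropSeen seen r := by
            simp [pvDropSeen, hwseen]
          have hstep : pvBFlush d (kw, seen) (w :: r) = pvBFlush d (kw, seen) r := by
            simp only [pvBFlush, hdrop]
          rcases hr0 : r with _ | ⟨x, r'⟩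
          · -- empty keyword tail: the flush is a no-op and rest = u
            have hrestu : rest = u := by
              have := hrest; rw [hr0] at this; simpa using this
            have hflush : pvBFlush d (kw, seen) (w :: r) = (kw, seen) := by
              rw [hstep, hr0]; simp [pvBFlush, pvDropSeen]
            rw [hA, hruns]
            simp only [List.foldl_cons]
            rw [hflush, ← hrestu]
            exact ih rest hlen' kw words seen hrel
          · -- nonempty keyword tail: rest's first run is exactly r
            have hrne : rest.takeWhile (fun t => d.contains t) ≠ [] := by
              rw [← hr, hr0]; simp
            have hrunsrest : pvRuns d rest [] = r :: pvRuns d u [] := by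
              rcases hrest2 : rest with _ | ⟨y, ys⟩
              · rw [hrest2] at hrne; simp at hrne
              · have hy : d.contains y := by
                  have : y ∈ r := by
                    rw [hr, hrest2]
                    rw [hrest2] at hrne
                    rcases hpy : (fun t => d.contains t) y with _ | _
                    · simp [List.takeWhile_cons, hpy] at hrne
                    · simp [List.takeWhile_cons, hpy]
                  exact hrall y this
                rw [pvRuns]
                simp only [hy, if_pos, List.nil_append]
                rw [pvRuns_acc d ys [y] (by simp)]
                rw [hr, hu, hrest2]
                simp [List.takeWhile_cons, List.dropWhile_cons, hy]
            rw [hA, hruns]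
            simp only [List.foldl_cons]
            rw [hstep]
            obtain ⟨g1, g2⟩ := ih rest hlen' kw words seen hrel
            rw [hrunsrest] at g1 g2
            simp only [List.foldl_cons] at g1 g2
            exact ⟨g1, g2⟩
        · -- unseen head: A emits phrase w :: r; B flushes the same phrase
          have hwseen : w ∉ seen := fun h => hw ((hrel w).mpr h)
          set ph : List String := w :: r with hph
          set pw : Int := (ph.map (fun x => d.getD x 0)).sum with hpw
          set kw' : List (String × Int) := kw ++ [(PySem.Str.join " " ph, pw)] with hkw'
          have hA : pvASent d (w :: rest) kw words = pvASent d rest kw' (words ++ ph) := by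
            rw [pvASent]
            rw [if_pos ⟨hk, hw⟩]
            rw [pvAInner_eq]
            simp [hkw', hph, hpw, hr, List.map_cons, List.sum_cons]
          have hflush : pvBFlush d (kw, seen) ph =
              (kw', PySem.Set.update seen ph) := by
            have hsum : pw = d.getD w 0 + (List.map (fun x => d.getD x 0) r).sum := by
              rw [hpw, hph]; simp
            simp [pvBFlush, pvDropSeen_head_unseen seen w r hwseen, hph, hkw', hsum]
          have hskip : pvASent d rest kw' (words ++ ph) = pvASent d u kw' (words ++ ph) := by
            have h1 : ∀ x ∈ r, x ∈ words ++ ph := by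
              intro x hx; simp [hph, hx]
            calc pvASent d rest kw' (words ++ ph)
                = pvASent d (r ++ u) kw' (words ++ ph) := by rw [← hrest]
              _ = pvASent d u kw' (words ++ ph) := pvASent_skip d r u kw' _ h1
          have hrel' : ∀ x, x ∈ words ++ ph ↔ x ∈ PySem.Set.update seen ph := by
            intro x
            rw [PySem.Set.mem_update]
            simp only [List.mem_append]
            rw [hrel x]
          rw [hA, hskip, hruns]
          simp only [List.foldl_cons, hflush]
          exact ih u hulen kw' (words ++ ph) (PySem.Set.update seen ph) hrel'
      · -- not a keyword: both sides skip the token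
        have : pvRuns d (w :: rest) [] = pvRuns d rest [] := by
          rw [pvRuns]; simp [hk]
        rw [this, pvASent]
        simp only [hk, false_and, if_false]
        exact ih rest hlen' kw words seen hrel

-- fold the per-sentence lemma over all sentences
theorem pvFold_eq (d : PySem.Dict String Int) (sents : List (List String)) :
    ∀ (kw : List (String × Int)) (words : List String) (seen : PySem.Set String),
      (∀ x, x ∈ words ↔ x ∈ seen) →
      (sents.foldl (fun st sent => pvASent d sent st.1 st.2) (kw, words)).1 =
      (sents.foldl (fun st tokens => (pvRuns d tokens []).foldl (pvBFlush d) st) (kw, seen)).1 := by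
  induction sents with
  | nil => intro kw words seen _; rfl
  | cons s ss ih =>
    intro kw words seen hrel
    obtain ⟨h1, h2⟩ := pvSent_eq d s.length s le_rfl kw words seen hrel
    simp only [List.foldl_cons]
    have hA : pvASent d s kw words =
        ((pvASent d s kw words).1, (pvASent d s kw words).2) := rfl
    rw [hA]
    have hB : (pvRuns d s []).foldl (pvBFlush d) (kw, seen) =
        (((pvRuns d s []).foldl (pvBFlush d) (kw, seen)).1,
         ((pvRuns d s []).foldl (pvBFlush d) (kw, seen)).2) := rfl
    rw [hB] at *
    rw [h1]
    exact ih _ _ _ h2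

-- ===== VERDICT (by name: the statement is the Claim_ definition above) =====
theorem combine_adjacent_keywords_py_spec : Claim_equal_combine_adjacent_keywords_py := by
  intro ranks text total _
  unfold Spec_combine_adjacent_keywords_py
  unfold combine_adjacent_keywords_py combine_adjacent_keywords_py_alt
  have := pvFold_eq (PySem.Dict.ofList ranks) (pvSents text) [] [] PySem.Set.empty
    (by intro x; simp [PySem.Set.empty])
  simp only [this]
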